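-- pv_equiv track=rewrite | github.com/mochilang/mochi | tests/rosetta/transpiler/Python/fusc-sequence.py | fuscVal
-- ===== SOURCE A (Python) =====
-- def fuscVal(n):
--     a = 1
--     b = 0
--     x = n
--     while x > 0:
--         if x % 2 == 0:
--             x = x // 2
--             a = a + b
--         else:
--             x = (x - 1) // 2
--             b = a + b
--     if n == 0:
--         return 0
--     return b
-- ===== SOURCE B (Python) =====
-- def fuscVal(n):
--     if n <= 0:
--         return 0
--     # find highest power of two <= n
--     p = 1
--     while p * 2 <= n:
--         p = p * 2
--     # walk bits of n from most significant to least significant,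
--     # maintaining (a, b) = (fusc(m), fusc(m+1)) for the prefix m read so far
--     a, b = 0, 1
--     while p > 0:
--         if n // p % 2 == 1:
--             a, b = a + b, b
--         else:
--             a, b = a, a + b
--         p = p // 2
--     return a
-- ===== Notes on version B (the rewrite author's own statement) =====
-- stated objective: alternative
-- what changed: B walks the binary digits of n from most-significant to least-significant (after locating the highest power of two arithmetically), maintaining the pair (fusc(m), fusc(m+1)) for the prefix read so far, instead of A's LSB-to-MSB loop with its different state update; n <= 0 returns 0 as in A.
import Mathlib
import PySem

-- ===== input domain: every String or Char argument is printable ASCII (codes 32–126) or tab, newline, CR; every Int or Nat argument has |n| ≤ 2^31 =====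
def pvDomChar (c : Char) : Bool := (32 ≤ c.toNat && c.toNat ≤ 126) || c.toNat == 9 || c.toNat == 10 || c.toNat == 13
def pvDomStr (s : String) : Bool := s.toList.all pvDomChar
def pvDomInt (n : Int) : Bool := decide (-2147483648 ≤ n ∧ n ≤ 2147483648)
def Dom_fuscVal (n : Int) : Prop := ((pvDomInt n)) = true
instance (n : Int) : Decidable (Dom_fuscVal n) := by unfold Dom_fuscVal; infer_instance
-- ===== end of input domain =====

-- B iterates over the binary digits of n from MOST significant to least, maintaining
-- (fusc m, fusc (m+1)) for the prefix m read so far, instead of A's LSB-first loop.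
-- Objective: alternative decomposition (same cost), proved to return A's exact value.

-- ===== PORT A =====
-- A's while loop over state (x, a, b); returns the final (a, b).
def fuscLoopA (x a b : Int) : Int × Int :=
  if h : x > 0 then
    if PySem.Int.mod x 2 = 0 then
      fuscLoopA (PySem.Int.floordiv x 2) (a + b) b
    else
      fuscLoopA (PySem.Int.floordiv (x - 1) 2) a (a + b)
  else (a, b)
termination_by x.toNat
decreasing_by
  · rw [PySem.Int.floordiv_eq_ediv_of_pos (by omega)]; omega
  · rw [PySem.Int.floordiv_eq_ediv_of_pos (by omega)]; omega

def fuscVal (n : Int) : Int :=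
  let ab := fuscLoopA n 1 0
  if n = 0 then 0 else ab.2

-- ===== PORT B =====
-- first while loop of B: double p while p*2 <= n.  The '1 ≤ p' conjunct is a
-- totality guard only (p starts at 1 and only doubles, so it always holds on B's runs).
def fuscHighPow (n p : Int) : Int :=
  if h : 1 ≤ p ∧ p * 2 ≤ n then fuscHighPow n (p * 2) else p
termination_by (n - p).toNat
decreasing_by omega

-- second while loop of B over state (p, a, b), n fixed; returns the final a.
def fuscLoopB (n p a b : Int) : Int :=
  if h : p > 0 then
    if PySem.Int.mod (PySem.Int.floordiv n p) 2 = 1 then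
      fuscLoopB n (PySem.Int.floordiv p 2) (a + b) b
    else
      fuscLoopB n (PySem.Int.floordiv p 2) a (a + b)
  else a
termination_by p.toNat
decreasing_by
  all_goals rw [PySem.Int.floordiv_eq_ediv_of_pos (by omega)]; omega

def fuscVal_alt (n : Int) : Int :=
  if n ≤ 0 then 0
  else fuscLoopB n (fuscHighPow n 1) 0 1

-- ===== PRECONDITION & SPEC =====
def Spec_fuscVal (n : Int) (out : Int) : Prop := out = fuscVal_alt n
instance (n : Int) (out : Int) : Decidable (Spec_fuscVal n out) := by unfold Spec_fuscVal; infer_instance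

-- ===== CLAIM (what is proved, stated in full; the proofs are below) =====
def Claim_equal_fuscVal : Prop := ∀ (n : Int), Dom_fuscVal n → Spec_fuscVal n (fuscVal n)

-- ===== LEMMAS AND PROOFS =====

-- the fusc / Stern diatomic sequence, as a mathematical reference point
def fusc (n : Nat) : Nat :=
  if n = 0 then 0
  else if n = 1 then 1
  else if n % 2 = 0 then fusc (n / 2)
  else fusc (n / 2) + fusc (n / 2 + 1)
termination_by n
decreasing_by all_goals omega

theorem fusc_zero : fusc 0 = 0 := by unfold fusc; rfl

theorem fusc_one : fusc 1 = 1 := by unfold fusc; rfl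

theorem fusc_two_mul (k : Nat) : fusc (2 * k) = fusc k := by
  rcases Nat.eq_zero_or_pos k with hk | hk
  · subst hk; rfl
  · rw [fusc]
    have h0 : ¬ 2 * k = 0 := by omega
    have h2 : ¬ 2 * k = 1 := by omega
    have hm : 2 * k % 2 = 0 := by omega
    have hd : 2 * k / 2 = k := by omega
    rw [if_neg h0, if_neg h2, if_pos hm, hd]

theorem fusc_two_mul_add_one (k : Nat) : fusc (2 * k + 1) = fusc k + fusc (k + 1) := by
  rcases Nat.eq_zero_or_pos k with hk | hk
  · subst hk; rw [fusc_zero, fusc_one]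
  · rw [fusc]
    have h0 : ¬ 2 * k + 1 = 0 := by omega
    have h2 : ¬ 2 * k + 1 = 1 := by omega
    have hm : ¬ (2 * k + 1) % 2 = 0 := by omega
    have hd : (2 * k + 1) / 2 = k := by omega
    rw [if_neg h0, if_neg h2, if_neg hm, hd]

-- Invariant of A's loop: the final b is a·fusc x + b·fusc (x+1)  (for x ≤ 0 this reads b).
theorem fuscLoopA_inv (m : Nat) : ∀ x a b : Int, x.toNat = m →
    (fuscLoopA x a b).2 = a * (fusc x.toNat : Int) + b * (fusc (x.toNat + 1) : Int) := by
  induction m using Nat.strong_induction_on with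
  | _ m ih =>
    intro x a b hm
    rw [fuscLoopA]
    by_cases hx : x > 0
    · have hfd : PySem.Int.floordiv x 2 = x / 2 :=
        PySem.Int.floordiv_eq_ediv_of_pos (by omega)
      have hfd' : PySem.Int.floordiv (x - 1) 2 = (x - 1) / 2 :=
        PySem.Int.floordiv_eq_ediv_of_pos (by omega)
      have hmod : PySem.Int.mod x 2 = x % 2 :=
        PySem.Int.mod_eq_emod_of_pos (by omega)
      rw [dif_pos hx, hmod]
      by_cases he : x % 2 = 0
      · rw [if_pos he, hfd]
        have hlt : (x / 2).toNat < m := by omega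
        rw [ih _ hlt (x / 2) (a + b) b rfl]
        have hk : x.toNat = 2 * (x / 2).toNat := by omega
        have hk1 : x.toNat + 1 = 2 * (x / 2).toNat + 1 := by omega
        rw [hk1, hk, fusc_two_mul, fusc_two_mul_add_one]
        push_cast; ring
      · rw [if_neg he, hfd']
        have hlt : ((x - 1) / 2).toNat < m := by omega
        rw [ih _ hlt ((x - 1) / 2) a (a + b) rfl]
        have hk : x.toNat = 2 * ((x - 1) / 2).toNat + 1 := by omega
        have hk1 : x.toNat + 1 = 2 * (((x - 1) / 2).toNat + 1) := by omega
        rw [hk1, hk, fusc_two_mul_add_one, fusc_two_mul]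
        push_cast; ring
    · have hx0 : x.toNat = 0 := by omega
      rw [dif_neg hx, hx0, fusc_zero, fusc_one]
      push_cast; ring

theorem fuscVal_eq_fusc (n : Int) : fuscVal n = (fusc n.toNat : Int) := by
  unfold fuscVal
  by_cases h0 : n = 0
  · simp [h0, fusc_zero]
  · simp only [h0, if_false]
    rw [fuscLoopA_inv n.toNat n 1 0 rfl]
    ring

-- Invariant of B's second loop: for p = 2^k, starting from
-- (fusc (n/2^(k+1)), fusc (n/2^(k+1) + 1)), the loop returns fusc n.
theorem fuscLoopB_inv (k : Nat) : ∀ n : Int, 0 ≤ n →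
    fuscLoopB n (2 ^ k) (fusc ((n / 2 ^ (k + 1)).toNat) : Int)
      (fusc ((n / 2 ^ (k + 1)).toNat + 1) : Int) = (fusc n.toNat : Int) := by
  induction k with
  | zero =>
    intro n hn
    rw [fuscLoopB]
    rw [dif_pos (by norm_num : (2:Int) ^ 0 > 0)]
    have hfdn : PySem.Int.floordiv n (2 ^ 0) = n := by
      rw [PySem.Int.floordiv_eq_ediv_of_pos (by norm_num)]; simp
    have hmod : PySem.Int.mod n 2 = n % 2 := PySem.Int.mod_eq_emod_of_pos (by norm_num)
    have hfdp : PySem.Int.floordiv (2 ^ 0) 2 = 0 := by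
      rw [PySem.Int.floordiv_eq_ediv_of_pos (by norm_num)]; decide
    by_cases hb : n % 2 = 1
    · rw [if_pos (by rw [hfdn, hmod]; exact hb), hfdp, fuscLoopB,
        dif_neg (by norm_num : ¬ ((0:Int) > 0))]
      have : n.toNat = 2 * ((n / 2 ^ (0 + 1)).toNat) + 1 := by omega
      rw [this, fusc_two_mul_add_one]; push_cast; ring
    · rw [if_neg (by rw [hfdn, hmod]; exact hb), hfdp, fuscLoopB,
        dif_neg (by norm_num : ¬ ((0:Int) > 0))]
      have : n.toNat = 2 * ((n / 2 ^ (0 + 1)).toNat) := by omega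
      rw [this, fusc_two_mul]
  | succ k ih =>
    intro n hn
    rw [fuscLoopB]
    rw [dif_pos (by positivity : (2:Int) ^ (k + 1) > 0)]
    have hfdp : PySem.Int.floordiv (2 ^ (k + 1)) 2 = 2 ^ k := by
      rw [PySem.Int.floordiv_eq_ediv_of_pos (by norm_num), pow_succ]
      rw [Int.mul_ediv_cancel _ (by norm_num)]
    have hfdn : PySem.Int.floordiv n (2 ^ (k + 1)) = n / 2 ^ (k + 1) :=
      PySem.Int.floordiv_eq_ediv_of_pos (by positivity)
    have hmod : PySem.Int.mod (n / 2 ^ (k + 1)) 2 = (n / 2 ^ (k + 1)) % 2 :=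
      PySem.Int.mod_eq_emod_of_pos (by norm_num)
    have hq : 0 ≤ n / 2 ^ (k + 1) := Int.ediv_nonneg hn (by positivity)
    have hhalf : n / 2 ^ (k + 1 + 1) = (n / 2 ^ (k + 1)) / 2 := by
      rw [pow_succ]
      exact (Int.ediv_ediv_of_nonneg (by positivity : (0:Int) ≤ 2 ^ (k + 1))).symm
    set q := n / 2 ^ (k + 1) with hqdef
    have hq2 : 0 ≤ n / 2 ^ (k + 1 + 1) := Int.ediv_nonneg hn (by positivity)
    by_cases hb : q % 2 = 1
    · rw [if_pos (by rw [hfdn, hmod]; exact hb), hfdp]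
      have h1 : q.toNat = 2 * ((n / 2 ^ (k + 1 + 1)).toNat) + 1 := by
        rw [hhalf]; omega
      have h2 : q.toNat + 1 = 2 * ((n / 2 ^ (k + 1 + 1)).toNat + 1) := by omega
      have := ih n hn
      rw [h2, h1, fusc_two_mul_add_one, fusc_two_mul] at this
      rw [← this]; push_cast; ring_nf
    · rw [if_neg (by rw [hfdn, hmod]; exact hb), hfdp]
      have h1 : q.toNat = 2 * ((n / 2 ^ (k + 1 + 1)).toNat) := by
        rw [hhalf]; omega
      have h2 : q.toNat + 1 = 2 * ((n / 2 ^ (k + 1 + 1)).toNat) + 1 := by omega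
      have := ih n hn
      rw [h2, h1, fusc_two_mul, fusc_two_mul_add_one] at this
      rw [← this]; push_cast; ring_nf

-- fuscHighPow starting from a power of two returns a power of two 2^k with n < 2^(k+1)
theorem fuscHighPow_pow (m : Nat) : ∀ n p : Int, (n - p).toNat = m → ∀ j : Nat, p = 2 ^ j →
    ∃ k : Nat, fuscHighPow n p = 2 ^ k ∧ n < 2 ^ (k + 1) := by
  induction m using Nat.strong_induction_on with
  | _ m ih =>
    intro n p hm j hj
    rw [fuscHighPow]
    have hp0 : (0:Int) < 2 ^ j := by positivity
    have hp1 : 1 ≤ p := by rw [hj]; omega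
    by_cases h : 1 ≤ p ∧ p * 2 ≤ n
    · have hlt : (n - p * 2).toNat < m := by omega
      have := ih _ hlt n (p * 2) rfl (j + 1) (by rw [hj, pow_succ])
      simpa [h] using this
    · rw [dif_neg h]
      refine ⟨j, hj, ?_⟩; rw [pow_succ]; omega

theorem fuscValAlt_eq_fusc (n : Int) : fuscVal_alt n = (fusc n.toNat : Int) := by
  unfold fuscVal_alt
  by_cases h0 : n ≤ 0
  · have : n.toNat = 0 := by omega
    simp [h0, this, fusc_zero]
  · rw [if_neg h0]
    obtain ⟨k, hk, hklt⟩ := fuscHighPow_pow (n - 1).toNat n 1 rfl 0 (by norm_num)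
    rw [hk]
    have hdiv : n / 2 ^ (k + 1) = 0 := Int.ediv_eq_zero_of_lt (by omega) hklt
    have := fuscLoopB_inv k n (by omega)
    rw [hdiv] at this
    simpa [fusc_zero, fusc_one] using this

-- ===== VERDICT (by name: the statement is the Claim_ definition above) =====
theorem fuscVal_spec : Claim_equal_fuscVal := by
  intro n _
  unfold Spec_fuscVal
  rw [fuscVal_eq_fusc, fuscValAlt_eq_fusc]
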